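-- pv_equiv track=rewrite | github.com/devcrypted/mparivahan-car-fancy-number-fetcher | main.py | categorize_number
-- ===== SOURCE A (Python) =====
-- def categorize_number(num_str: str) -> str:
--     """Categorize a 4-digit number string into a pattern category."""
--     if len(num_str) != 4 or not num_str.isdigit():
--         return "OTHER"
--
--     a, b, c, d = num_str
--
--     if a == b == c == d:
--         return "XXXX"
--     if b == c == d and a != b:
--         return "XYYY"
--     if a == b == c and d != a:
--         return "YYYX"
--     if a == b and c == d and a != c:
--         return "XXYY"
--     if a == c and b == d and a != b:
--         return "XYXY"
--     if a == d and b == c and a != b: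
--         return "XYYX"
--     if a == b and c != d and c != a and d != a:
--         return "XXYZ"
--     if c == d and a != b and a != c and b != c:
--         return "XYZZ"
--
--     digits = [int(ch) for ch in num_str]
--     diffs = [digits[i + 1] - digits[i] for i in range(3)]
--     if diffs == [1, 1, 1] or diffs == [-1, -1, -1]:
--         return "SEQUENTIAL"
--
--     return "OTHER"
-- ===== SOURCE B (Python) =====
-- _SHAPE_LABELS = {
--     "XXXX": "XXXX",
--     "XYYY": "XYYY",
--     "XXXY": "YYYX",   # A labels the a==b==c shape "YYYX"
--     "XXYY": "XXYY",
--     "XYXY": "XYXY",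
--     "XYYX": "XYYX",
--     "XXYZ": "XXYZ",
--     "XYZZ": "XYZZ",
-- }
--
--
-- def categorize_number(num_str: str) -> str:
--     """Categorize a 4-digit number string into a pattern category."""
--     if len(num_str) != 4 or not num_str.isdigit():
--         return "OTHER"
--     # canonical signature: letters assigned in order of first appearance
--     seen = []
--     sig = ""
--     for ch in num_str:
--         if ch not in seen:
--             seen.append(ch)
--         sig += "XYZW"[seen.index(ch)]
--     if sig in _SHAPE_LABELS:
--         return _SHAPE_LABELS[sig]
--     d = [int(ch) for ch in num_str]
--     if all(d[i + 1] - d[i] == 1 for i in range(3)) or all(d[i + 1] - d[i] == -1 for i in range(3)):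
--         return "SEQUENTIAL"
--     return "OTHER"
-- ===== Notes on version B (the rewrite author's own statement) =====
-- stated objective: simpler
-- what changed: Replaces A's chain of eight hand-written equality/inequality branch conditions by computing a canonical first-appearance signature of the four characters and looking it up in a shape-to-label table; only the guard and the trailing sequential check remain.
import Mathlib
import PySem

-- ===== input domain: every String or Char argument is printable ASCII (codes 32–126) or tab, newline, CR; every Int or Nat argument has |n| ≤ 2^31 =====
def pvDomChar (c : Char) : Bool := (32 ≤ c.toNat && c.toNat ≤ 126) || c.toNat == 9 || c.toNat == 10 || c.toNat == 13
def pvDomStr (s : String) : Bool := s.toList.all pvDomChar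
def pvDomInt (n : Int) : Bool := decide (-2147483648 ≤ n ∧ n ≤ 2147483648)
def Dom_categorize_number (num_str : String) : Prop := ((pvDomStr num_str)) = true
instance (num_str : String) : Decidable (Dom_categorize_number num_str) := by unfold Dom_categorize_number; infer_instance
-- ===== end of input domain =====

-- B replaces A's chain of eight hand-written equality/inequality branches by a canonical
-- first-appearance signature looked up in a shape→label table (objective: simpler).

-- ===== PORT A =====
def categorize_number (num_str : String) : String :=
  -- str.isdigit() = nonempty ∧ all chars digits; the 'length ≠ 4' disjunct already covers
  -- the empty string, so 'all isdigit' is exact here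
  if num_str.toList.length ≠ 4 ∨ ¬ num_str.toList.all PySem.Chars.isdigit then "OTHER"
  else
    match num_str.toList with
    | [a, b, c, d] =>
      if a = b ∧ b = c ∧ c = d then "XXXX"
      else if (b = c ∧ c = d) ∧ a ≠ b then "XYYY"
      else if (a = b ∧ b = c) ∧ d ≠ a then "YYYX"
      else if a = b ∧ c = d ∧ a ≠ c then "XXYY"
      else if a = c ∧ b = d ∧ a ≠ b then "XYXY"
      else if a = d ∧ b = c ∧ a ≠ b then "XYYX"
      else if a = b ∧ c ≠ d ∧ c ≠ a ∧ d ≠ a then "XXYZ"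
      else if c = d ∧ a ≠ b ∧ a ≠ c ∧ b ≠ c then "XYZZ"
      else
        -- int(ch): exact for digit chars (guaranteed by the guard)
        let digits := num_str.toList.map (fun ch => (ch.toNat : Int) - 48)
        -- digits[i+1]/digits[i]: indices are in range here, so getD is exact
        let diffs := (PySem.List.pyRange 0 3 1).map (fun i =>
          PySem.List.pyGetD digits (i + 1) 0 - PySem.List.pyGetD digits i 0)
        if diffs = [1, 1, 1] ∨ diffs = [-1, -1, -1] then "SEQUENTIAL" else "OTHER"
    | _ => "OTHER"  -- unreachable: the guard ensures length 4

-- ===== PORT B =====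
def pvShapeLabels : PySem.Dict String String :=
  (((((((PySem.Dict.empty.insert "XXXX" "XXXX").insert "XYYY" "XYYY").insert
    "XXXY" "YYYX").insert "XXYY" "XXYY").insert "XYXY" "XYXY").insert
    "XYYX" "XYYX").insert "XXYZ" "XXYZ").insert "XYZZ" "XYZZ"

-- one iteration of B's signature loop: update 'seen', append '"XYZW"[seen.index(ch)]'
-- ("XYZW"[…] is always in range — at most 4 distinct chars — so getD is exact)
def pvSigStep (st : List Char × List Char) (ch : Char) : List Char × List Char :=
  let seen := if st.1.contains ch then st.1 else st.1 ++ [ch]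
  (seen, st.2 ++ [(PySem.Str.pyGet? "XYZW" (((PySem.List.index? seen ch).getD 0 : Nat) : Int)).getD '?'])

def categorize_number_alt (num_str : String) : String :=
  if num_str.toList.length ≠ 4 ∨ ¬ num_str.toList.all PySem.Chars.isdigit then "OTHER"
  else
    let sig := String.ofList (num_str.toList.foldl pvSigStep ([], [])).2
    match pvShapeLabels.get? sig with
    | some v => v
    | none =>
      let d := num_str.toList.map (fun ch => (ch.toNat : Int) - 48)
      if (PySem.List.pyRange 0 3 1).all
          (fun i => PySem.List.pyGetD d (i + 1) 0 - PySem.List.pyGetD d i 0 == 1)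
        ∨ (PySem.List.pyRange 0 3 1).all
          (fun i => PySem.List.pyGetD d (i + 1) 0 - PySem.List.pyGetD d i 0 == -1)
      then "SEQUENTIAL" else "OTHER"

-- ===== PRECONDITION & SPEC =====
def Spec_categorize_number (num_str : String) (out : String) : Prop := out = categorize_number_alt num_str
instance (num_str : String) (out : String) : Decidable (Spec_categorize_number num_str out) := by unfold Spec_categorize_number; infer_instance

-- ===== CLAIM (what is proved, stated in full; the proofs are below) =====
def Claim_equal_categorize_number : Prop := ∀ (num_str : String), Dom_categorize_number num_str → Spec_categorize_number num_str (categorize_number num_str)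

-- ===== LEMMAS AND PROOFS =====

-- the table's value on each of the 15 canonical 4-char signatures
theorem pvLk01 : pvShapeLabels.get? ("XXXX") = some "XXXX" := by decide
theorem pvLk02 : pvShapeLabels.get? ("XYYY") = some "XYYY" := by decide
theorem pvLk03 : pvShapeLabels.get? ("XXXY") = some "YYYX" := by decide
theorem pvLk04 : pvShapeLabels.get? ("XXYY") = some "XXYY" := by decide
theorem pvLk05 : pvShapeLabels.get? ("XYXY") = some "XYXY" := by decide
theorem pvLk06 : pvShapeLabels.get? ("XYYX") = some "XYYX" := by decide
theorem pvLk07 : pvShapeLabels.get? ("XXYZ") = some "XXYZ" := by decide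
theorem pvLk08 : pvShapeLabels.get? ("XYZZ") = some "XYZZ" := by decide
theorem pvLk09 : pvShapeLabels.get? ("XXYX") = none := by decide
theorem pvLk10 : pvShapeLabels.get? ("XYXX") = none := by decide
theorem pvLk11 : pvShapeLabels.get? ("XYXZ") = none := by decide
theorem pvLk12 : pvShapeLabels.get? ("XYYZ") = none := by decide
theorem pvLk13 : pvShapeLabels.get? ("XYZX") = none := by decide
theorem pvLk14 : pvShapeLabels.get? ("XYZY") = none := by decide
theorem pvLk15 : pvShapeLabels.get? ("XYZW") = none := by decide

set_option maxHeartbeats 4000000 in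
theorem pvKey (s : String) (a b c d : Char) (h : s.toList = [a, b, c, d]) :
    categorize_number s = categorize_number_alt s := by
  by_cases hdig : ([a, b, c, d].all PySem.Chars.isdigit : Prop)
  · simp only [categorize_number, categorize_number_alt, h]
    have hng : ¬(([a, b, c, d] : List Char).length ≠ 4 ∨
        ¬[a, b, c, d].all PySem.Chars.isdigit) := by simp [hdig]
    rw [if_neg hng, if_neg hng]
    by_cases hab : a = b <;> by_cases hac : a = c <;> by_cases had : a = d <;>
      by_cases hbc : b = c <;> by_cases hbd : b = d <;> by_cases hcd : c = d <;>
      (subst_vars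
       try have hab2 := Ne.symm hab
       try have hac2 := Ne.symm hac
       try have had2 := Ne.symm had
       try have hbc2 := Ne.symm hbc
       try have hbd2 := Ne.symm hbd
       try have hcd2 := Ne.symm hcd
       simp_all [pvSigStep, List.idxOf?_cons,
         pvLk01, pvLk02, pvLk03, pvLk04, pvLk05, pvLk06, pvLk07, pvLk08,
         pvLk09, pvLk10, pvLk11, pvLk12, pvLk13, pvLk14, pvLk15,
         PySem.List.pyRange_one, List.range_succ, PySem.List.pyGetD, PySem.List.pyGet?, PySem.List.pyIdx?])
  · simp [categorize_number, categorize_number_alt, h, hdig]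

-- ===== VERDICT (by name: the statement is the Claim_ definition above) =====
theorem categorize_number_spec : Claim_equal_categorize_number := by
  intro s _
  unfold Spec_categorize_number
  by_cases hg : (s.toList.length ≠ 4 ∨ ¬ s.toList.all PySem.Chars.isdigit)
  · unfold categorize_number categorize_number_alt
    rw [if_pos hg, if_pos hg]
  · have h4 : s.toList.length = 4 := by
      by_contra hne; exact hg (Or.inl hne)
    obtain ⟨a, b, c, d, hl⟩ : ∃ a b c d, s.toList = [a, b, c, d] := by
      rcases hs : s.toList with _ | ⟨a, _ | ⟨b, _ | ⟨c, _ | ⟨d, _ | _⟩⟩⟩⟩ <;>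
        simp_all
    exact pvKey s a b c d hl
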